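-- pv_equiv track=rewrite | github.com/Bioniclegenius/TGRCBotProd | pluginfunctions.py | msgcont
-- ===== SOURCE A (Python) =====
-- def msgcont(msg,start=1):
--     temp=""
--     if len(msg)>start:
--         for x in range(start,len(msg)):
--             temp+=msg[x]
--             if msg[x]!="":
--                 if msg[x][-2:]=="\r\n":
--                     break
--             if x<len(msg)-1:
--                 temp+=" "
--     return temp
-- ===== SOURCE B (Python) =====
-- def msgcont(msg, start=1):
--     # Reverse sweep: walk indices from the end of msg down to start, resetting
--     # the collected tail whenever a CRLF-terminated element is met (so the part
--     # after the first terminator is discarded automatically), then join once.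
--     parts = []
--     for x in reversed(range(start, len(msg))):
--         e = msg[x]
--         if e != "" and e[-2:] == "\r\n":
--             parts = [e]
--         else:
--             parts.append(e)
--     return " ".join(reversed(parts))
-- ===== Notes on version B (the rewrite author's own statement) =====
-- stated objective: alternative
-- what changed: Replaces A's forward accumulate-with-break loop by a reverse sweep from the end of the list down to start whose accumulator is reset whenever a CRLF-terminated element is met (discarding everything after the first terminator without any break or cutoff search), finished by a single join.
import Mathlib
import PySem

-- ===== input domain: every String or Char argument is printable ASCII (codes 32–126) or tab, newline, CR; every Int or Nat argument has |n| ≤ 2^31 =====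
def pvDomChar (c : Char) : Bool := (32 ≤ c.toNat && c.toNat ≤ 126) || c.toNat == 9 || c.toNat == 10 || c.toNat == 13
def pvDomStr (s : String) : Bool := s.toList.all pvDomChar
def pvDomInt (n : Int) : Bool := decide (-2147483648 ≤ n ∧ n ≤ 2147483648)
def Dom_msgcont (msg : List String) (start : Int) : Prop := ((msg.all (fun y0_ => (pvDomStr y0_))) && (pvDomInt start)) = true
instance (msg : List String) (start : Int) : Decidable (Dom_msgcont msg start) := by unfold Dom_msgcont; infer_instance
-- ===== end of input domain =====

-- B replaces A's forward accumulate-with-break loop by a reverse sweep whose accumulator resets at each CRLF-terminated element, then one join; same cost, different traversal.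


-- ===== PORT A =====
-- A's for-loop with break, accumulating temp; msg[x] via pyGetD (Pre_ excludes the IndexError inputs)
def msgcontLoopA (msg : List String) : List Int → String → String
  | [], temp => temp
  | x :: rest, temp =>
    let e := PySem.List.pyGetD msg x ""
    let temp := temp ++ e
    if e ≠ "" ∧ PySem.Str.slice e (some (-2)) none = "\r\n" then temp
    else
      let temp := if x < (msg.length : Int) - 1 then temp ++ " " else temp
      msgcontLoopA msg rest temp

def msgcont (msg : List String) (start : Int) : String :=
  let temp := ""
  if (msg.length : Int) > start then
    msgcontLoopA msg (PySem.List.pyRange start (msg.length : Int) 1) temp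
  else temp

-- ===== PORT B =====
-- B's reverse sweep: parts is reset to [e] at a terminator, else e is appended
def msgcontLoopB (msg : List String) : List Int → List String → List String
  | [], parts => parts
  | x :: rest, parts =>
    let e := PySem.List.pyGetD msg x ""
    if e ≠ "" ∧ PySem.Str.slice e (some (-2)) none = "\r\n" then
      msgcontLoopB msg rest [e]
    else
      msgcontLoopB msg rest (parts ++ [e])

def msgcont_alt (msg : List String) (start : Int) : String :=
  let parts := msgcontLoopB msg (PySem.List.pyRange start (msg.length : Int) 1).reverse []
  PySem.Str.join " " parts.reverse

-- ===== PRECONDITION & SPEC =====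
-- Pre_ excludes exactly the inputs where Python A raises IndexError: start below -len(msg)
-- (the loop then runs and msg[start] is out of range; B raises there too).
def Pre_msgcont (msg : List String) (start : Int) : Prop := -(msg.length : Int) ≤ start
instance (msg : List String) (start : Int) : Decidable (Pre_msgcont msg start) := by unfold Pre_msgcont; infer_instance
def pvWitness_msgcont : List String × Int := (["cmd", "hello", "world\r\n", "tail"], 1)
def Spec_msgcont (msg : List String) (start : Int) (out : String) : Prop := out = msgcont_alt msg start
instance (msg : List String) (start : Int) (out : String) : Decidable (Spec_msgcont msg start out) := by unfold Spec_msgcont; infer_instance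

-- ===== CLAIM (what is proved, stated in full; the proofs are below) =====
def Claim_equal_msgcont : Prop := ∀ (msg : List String) (start : Int), Dom_msgcont msg start → Pre_msgcont msg start → Spec_msgcont msg start (msgcont msg start)

-- ===== LEMMAS AND PROOFS =====

-- proof-only helper: one past the first index of l whose element is CRLF-terminated, default n
def msgcontFindEnd (msg : List String) (n : Int) : List Int → Int
  | [] => n
  | x :: rest =>
    let e := PySem.List.pyGetD msg x ""
    if e ≠ "" ∧ PySem.Str.slice e (some (-2)) none = "\r\n" then x + 1
    else msgcontFindEnd msg n rest

theorem msgcont_join_nil : PySem.Str.join " " [] = "" := by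
  decide

theorem msgcont_join_singleton (p : String) : PySem.Str.join " " [p] = p := by
  apply String.toList_injective
  simp [PySem.Str.toList_join, PySem.Chars.join_singleton]

theorem msgcont_join_cons_cons (p q : String) (rest : List String) :
    PySem.Str.join " " (p :: q :: rest) = p ++ " " ++ PySem.Str.join " " (q :: rest) := by
  apply String.toList_injective
  simp [PySem.Str.toList_join, PySem.Chars.join_cons_cons]

theorem msgcontLoopA_prefix (msg : List String) (l : List Int) (t : String) :
    msgcontLoopA msg l t = t ++ msgcontLoopA msg l "" := by
  induction l generalizing t with
  | nil => simp [msgcontLoopA]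
  | cons x rest ih =>
    simp only [msgcontLoopA]
    split_ifs with h1 h2
    · simp
    · rw [ih, ih (("" ++ _) ++ " ")]; simp [String.append_assoc]
    · rw [ih, ih ("" ++ _)]; simp [String.append_assoc]

theorem msgcontFindEnd_ge (msg : List String) (n m : Int) (l : List Int)
    (hn : m ≤ n) (h : ∀ x ∈ l, m ≤ x + 1) : m ≤ msgcontFindEnd msg n l := by
  induction l with
  | nil => simpa [msgcontFindEnd]
  | cons x rest ih =>
    simp only [msgcontFindEnd]
    split_ifs
    · exact h x (by simp)
    · exact ih (fun y hy => h y (by simp [hy]))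

-- A's loop over range(s,n) equals the join over range(s, cut) where cut = msgcontFindEnd
theorem msgcont_main (msg : List String) (k : Nat) :
    ∀ s : Int, ((msg.length : Int) - s).toNat = k →
      msgcontLoopA msg (PySem.List.pyRange s (msg.length : Int) 1) "" =
        PySem.Str.join " "
          ((PySem.List.pyRange s (msgcontFindEnd msg (msg.length : Int) (PySem.List.pyRange s (msg.length : Int) 1)) 1).map
            (fun x => PySem.List.pyGetD msg x "")) := by
  induction k with
  | zero =>
    intro s hs
    have hsn : (msg.length : Int) ≤ s := by omega
    rw [PySem.List.pyRange_one_eq_nil hsn]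
    simp only [msgcontFindEnd]
    rw [PySem.List.pyRange_one_eq_nil hsn]
    simp [msgcontLoopA, msgcont_join_nil]
  | succ k ih =>
    intro s hs
    have hlt : s < (msg.length : Int) := by omega
    rw [PySem.List.pyRange_one_cons hlt]
    simp only [msgcontLoopA, msgcontFindEnd]
    split_ifs with hc hx
    · rw [PySem.List.pyRange_one_cons (show s < s + 1 by omega),
          PySem.List.pyRange_one_eq_nil (show s + 1 ≤ s + 1 by omega)]
      simp [msgcont_join_singleton]
    · have hs1 : ((msg.length : Int) - (s + 1)).toNat = k := by omega
      have hend : s + 2 ≤ msgcontFindEnd msg (msg.length : Int) (PySem.List.pyRange (s+1) (msg.length : Int) 1) := by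
        apply msgcontFindEnd_ge
        · omega
        · intro y hy
          rw [PySem.List.mem_pyRange_one] at hy
          omega
      set e := msgcontFindEnd msg (msg.length : Int) (PySem.List.pyRange (s+1) (msg.length : Int) 1) with he
      rw [msgcontLoopA_prefix, ih (s+1) hs1]
      rw [PySem.List.pyRange_one_cons (show s < e by omega),
          PySem.List.pyRange_one_cons (show s + 1 < e by omega)]
      simp only [List.map_cons]
      rw [msgcont_join_cons_cons]
      simp [String.append_assoc]
    · rw [PySem.List.pyRange_one_eq_nil (show (msg.length : Int) ≤ s + 1 by omega)]
      simp only [msgcontFindEnd]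
      rw [PySem.List.pyRange_one_cons hlt,
          PySem.List.pyRange_one_eq_nil (show (msg.length : Int) ≤ s + 1 by omega)]
      simp [msgcontLoopA, msgcont_join_singleton]

-- B's loop processes the final element of its index list last
theorem msgcontLoopB_append (msg : List String) (l : List Int) (x : Int) (parts : List String) :
    msgcontLoopB msg (l ++ [x]) parts =
      if PySem.List.pyGetD msg x "" ≠ "" ∧ PySem.Str.slice (PySem.List.pyGetD msg x "") (some (-2)) none = "\r\n"
      then [PySem.List.pyGetD msg x ""]
      else msgcontLoopB msg l parts ++ [PySem.List.pyGetD msg x ""] := by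
  induction l generalizing parts with
  | nil => simp [msgcontLoopB]
  | cons y rest ih =>
    simp only [List.cons_append, msgcontLoopB]
    split_ifs with h1 h2 h2
    · rw [ih, if_pos h2]
    · rw [ih, if_neg h2]
    · rw [ih, if_pos h2]
    · rw [ih, if_neg h2]

-- B's reverse sweep over range(s,n) collects, in reverse, the elements of range(s, cut)
theorem msgcont_mainB (msg : List String) (k : Nat) :
    ∀ s : Int, ((msg.length : Int) - s).toNat = k →
      msgcontLoopB msg (PySem.List.pyRange s (msg.length : Int) 1).reverse [] =
        ((PySem.List.pyRange s (msgcontFindEnd msg (msg.length : Int) (PySem.List.pyRange s (msg.length : Int) 1)) 1).map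
          (fun x => PySem.List.pyGetD msg x "")).reverse := by
  induction k with
  | zero =>
    intro s hs
    have hsn : (msg.length : Int) ≤ s := by omega
    rw [PySem.List.pyRange_one_eq_nil hsn]
    simp only [msgcontFindEnd]
    rw [PySem.List.pyRange_one_eq_nil hsn]
    simp [msgcontLoopB]
  | succ k ih =>
    intro s hs
    have hlt : s < (msg.length : Int) := by omega
    rw [PySem.List.pyRange_one_cons hlt]
    simp only [List.reverse_cons, msgcontFindEnd]
    rw [msgcontLoopB_append]
    split_ifs with hc
    · rw [PySem.List.pyRange_one_cons (show s < s + 1 by omega),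
          PySem.List.pyRange_one_eq_nil (show s + 1 ≤ s + 1 by omega)]
      simp
    · have hs1 : ((msg.length : Int) - (s + 1)).toNat = k := by omega
      have hend : s + 1 ≤ msgcontFindEnd msg (msg.length : Int) (PySem.List.pyRange (s+1) (msg.length : Int) 1) := by
        apply msgcontFindEnd_ge
        · omega
        · intro y hy
          rw [PySem.List.mem_pyRange_one] at hy
          omega
      set e := msgcontFindEnd msg (msg.length : Int) (PySem.List.pyRange (s+1) (msg.length : Int) 1) with he
      rw [ih (s+1) hs1]
      rw [PySem.List.pyRange_one_cons (show s < e by omega)]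
      simp only [List.map_cons, List.reverse_cons]
      rw [he]

-- ===== VERDICT (by name: the statement is the Claim_ definition above) =====
theorem msgcont_spec : Claim_equal_msgcont := by
  intro msg start _ _
  unfold Spec_msgcont msgcont msgcont_alt
  by_cases h : start < (msg.length : Int)
  · simp only [if_pos (show (msg.length : Int) > start from h)]
    rw [msgcont_mainB msg ((msg.length : Int) - start).toNat start rfl, List.reverse_reverse]
    exact msgcont_main msg ((msg.length : Int) - start).toNat start rfl
  · simp only [if_neg (show ¬ (msg.length : Int) > start from h)]
    have h1 : PySem.List.pyRange start (msg.length : Int) 1 = [] :=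
      PySem.List.pyRange_one_eq_nil (by omega)
    rw [h1]
    simp [msgcontLoopB, msgcont_join_nil]
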